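-- pv_equiv track=rewrite | github.com/Grecu-Narcis/University | Semester 1/Fundamentals of programming/Labs/L05/program.py | property_1
-- ===== SOURCE A (Python) =====
-- def get_real_part(complex_number):
--     return complex_number["real"]
--
-- def get_imaginary_part(complex_number):
--     return complex_number["imaginary"]
--
-- def modulus(complex_number):
--     return get_real_part(complex_number) ** 2 + get_imaginary_part(complex_number) ** 2
--
-- def property_1(numbers):
--     """
--     return length and elements of the longest subarray of numbers having the same modulus.
--     :param numbers: list, representing the complex numbers
--     :return: tuple, first element is
--     """
--     max_length, length, end = 0, 0, 0
--     last_modulus = -1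
--
--     for i in range(len(numbers)):
--         if modulus(numbers[i]) == last_modulus:
--             length += 1
--
--         else:
--             if length > max_length:
--                 max_length = length
--                 end = i
--
--             length = 1
--             last_modulus = modulus(numbers[i])
--
--     if length > max_length:
--         max_length = length
--         end = len(numbers)
--
--     return max_length, numbers[end - max_length:end]
-- ===== SOURCE B (Python) =====
-- def property_1(numbers):
--     # Two-phase: build the list of maximal consecutive equal-modulus runs with a
--     # two-pointer scan, then reduce to the first longest run.
--     runs = []
--     i, n = 0, len(numbers)
--     while i < n:
--         m = numbers[i]["real"] ** 2 + numbers[i]["imaginary"] ** 2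
--         j = i + 1
--         while j < n and numbers[j]["real"] ** 2 + numbers[j]["imaginary"] ** 2 == m:
--             j += 1
--         runs.append(numbers[i:j])
--         i = j
--     best = []
--     for run in runs:
--         if len(run) > len(best):
--             best = run
--     return len(best), best
-- ===== Notes on version B (the rewrite author's own statement) =====
-- stated objective: idiomatic
-- what changed: Replaced the single index loop maintaining length/max_length/end and a -1 sentinel modulus with a two-phase build-then-reduce: a two-pointer scan splits the input into maximal equal-modulus runs, then a fold picks the first longest run.
import Mathlib
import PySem

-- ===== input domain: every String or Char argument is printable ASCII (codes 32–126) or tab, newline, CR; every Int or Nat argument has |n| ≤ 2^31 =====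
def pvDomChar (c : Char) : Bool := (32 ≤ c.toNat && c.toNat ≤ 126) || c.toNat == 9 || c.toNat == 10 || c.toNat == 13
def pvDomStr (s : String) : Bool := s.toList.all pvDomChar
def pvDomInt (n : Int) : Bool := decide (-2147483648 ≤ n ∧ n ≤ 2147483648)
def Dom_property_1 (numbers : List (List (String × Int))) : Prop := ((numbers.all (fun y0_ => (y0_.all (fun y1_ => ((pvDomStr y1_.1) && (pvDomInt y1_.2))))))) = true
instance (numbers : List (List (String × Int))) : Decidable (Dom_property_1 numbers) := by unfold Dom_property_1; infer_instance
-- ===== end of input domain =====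

-- B replaces A's single sentinel-guarded index loop by a build-then-reduce over maximal equal-modulus runs (idiomatic; same O(n) cost).

-- ===== PORT A =====
-- modulus(c) = c["real"]**2 + c["imaginary"]**2; Python raises KeyError when a key is
-- missing — Pre_property_1 excludes that, so the getD defaults are never reached.
def pvModulus (c : List (String × Int)) : Int :=
  ((c.lookup "real").getD 0) ^ 2 + ((c.lookup "imaginary").getD 0) ^ 2

def property_1 (numbers : List (List (String × Int))) : Int × (List (List (String × Int))) :=
  -- for i in range(len(numbers)): state (max_length, length, end, last_modulus)
  let st := (PySem.List.pyRange 0 (numbers.length : Int) 1).foldl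
    (fun (st : Int × Int × Int × Int) i =>
      match st with
      | (maxLength, length, ed, lastModulus) =>
        if pvModulus (PySem.List.pyGetD numbers i []) == lastModulus then
          (maxLength, length + 1, ed, lastModulus)
        else if length > maxLength then
          (length, 1, i, pvModulus (PySem.List.pyGetD numbers i []))
        else
          (maxLength, 1, ed, pvModulus (PySem.List.pyGetD numbers i [])))
    (0, 0, 0, -1)
  match st with
  | (maxLength, length, ed, _) =>
    if length > maxLength then
      (length, PySem.List.slice numbers (some ((numbers.length : Int) - length)) (some (numbers.length : Int)))
    else
      (maxLength, PySem.List.slice numbers (some (ed - maxLength)) (some ed))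

-- ===== PORT B =====
-- phase 1 of Source B: the outer while loop; the inner two-pointer while that extends j over
-- the current run is the takeWhile/dropWhile split of the remainder.
def pvRuns : List (List (String × Int)) → List (List (List (String × Int)))
  | [] => []
  | c :: rest =>
      (c :: rest.takeWhile (fun d => pvModulus d == pvModulus c)) ::
        pvRuns (rest.dropWhile (fun d => pvModulus d == pvModulus c))
  termination_by l => l.length
  decreasing_by
    have := List.length_dropWhile_le (p := fun d => pvModulus d == pvModulus c) (l := rest)
    simp; omega

def property_1_alt (numbers : List (List (String × Int))) : Int × (List (List (String × Int))) :=
  -- phase 2 of Source B: fold over the runs keeping the first strictly longest one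
  let best := (pvRuns numbers).foldl (fun best run => if run.length > best.length then run else best) []
  ((best.length : Int), best)

-- ===== PRECONDITION & SPEC =====
-- Pre_ excludes exactly the inputs where Python A raises KeyError: some element lacks the
-- key "real" or "imaginary" (B raises there too).
def Pre_property_1 (numbers : List (List (String × Int))) : Prop :=
  ∀ c ∈ numbers, (c.lookup "real").isSome ∧ (c.lookup "imaginary").isSome
instance (numbers : List (List (String × Int))) : Decidable (Pre_property_1 numbers) := by
  unfold Pre_property_1; infer_instance

def pvWitness_property_1 : (List (List (String × Int))) :=
  [[("real", 1), ("imaginary", 2)], [("real", 2), ("imaginary", 1)], [("real", 0), ("imaginary", 3)]]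

def Spec_property_1 (numbers : List (List (String × Int))) (out : Int × (List (List (String × Int)))) : Prop := out = property_1_alt numbers
instance (numbers : List (List (String × Int))) (out : Int × (List (List (String × Int)))) : Decidable (Spec_property_1 numbers out) := by unfold Spec_property_1; infer_instance

-- ===== CLAIM (what is proved, stated in full; the proofs are below) =====
def Claim_equal_property_1 : Prop := ∀ (numbers : List (List (String × Int))), Dom_property_1 numbers → Pre_property_1 numbers → Spec_property_1 numbers (property_1 numbers)

-- ===== LEMMAS AND PROOFS =====

-- proof-side replica of A's loop body, loop, and epilogue
def pvFA (st : Int × Int × Int × Int) (i : Int) (c : List (String × Int)) : Int × Int × Int × Int :=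
  match st with
  | (maxLength, length, ed, lastModulus) =>
    if pvModulus c == lastModulus then
      (maxLength, length + 1, ed, lastModulus)
    else if length > maxLength then
      (length, 1, i, pvModulus c)
    else
      (maxLength, 1, ed, pvModulus c)

def pvLoop : List (List (String × Int)) → Int → (Int × Int × Int × Int) → Int × Int × Int × Int
  | [], _, st => st
  | c :: cs, i, st => pvLoop cs (i + 1) (pvFA st i c)

def pvFinish (full : List (List (String × Int))) (st : Int × Int × Int × Int) : Int × (List (List (String × Int))) :=
  match st with
  | (maxLength, length, ed, _) =>
    if length > maxLength then
      (length, PySem.List.slice full (some ((full.length : Int) - length)) (some (full.length : Int)))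
    else
      (maxLength, PySem.List.slice full (some (ed - maxLength)) (some ed))

def pvBestF (b r : List (List (String × Int))) : List (List (String × Int)) :=
  if r.length > b.length then r else b

lemma pvModulus_nonneg (c : List (String × Int)) : 0 ≤ pvModulus c := by
  unfold pvModulus
  have h1 := sq_nonneg (((c.lookup "real").getD 0 : Int))
  have h2 := sq_nonneg (((c.lookup "imaginary").getD 0 : Int))
  omega

lemma pvFoldEqLoop (xs : List (List (String × Int))) :
    ∀ (ys : List (List (String × Int))) (k : Nat) (init : Int × Int × Int × Int),
      xs.drop k = ys →
      (PySem.List.pyRange (k : Int) (xs.length : Int) 1).foldl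
        (fun st i => pvFA st i (PySem.List.pyGetD xs i [])) init
      = pvLoop ys (k : Int) init := by
  intro ys
  induction ys with
  | nil =>
    intro k init h
    rw [PySem.List.pyRange_one_eq_nil (by exact_mod_cast List.drop_eq_nil_iff.mp h)]
    rfl
  | cons c cs ih =>
    intro k init h
    have hk : k < xs.length := by
      by_contra hc
      rw [List.drop_eq_nil_iff.mpr (by omega)] at h
      simp at h
    have hget : xs.getD k [] = c := by
      have h0 : xs[k]? = some c := by
        have h1 := List.getElem?_drop (xs := xs) (i := k) (j := 0)
        rw [h] at h1
        simpa using h1.symm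
      simp [List.getD, h0]
    have h1 : xs.drop (k + 1) = cs := by
      have h2 := List.drop_drop (i := 1) (j := k) (l := xs)
      rw [h] at h2
      simpa using h2.symm
    rw [PySem.List.pyRange_one_cons (by exact_mod_cast hk)]
    simp only [List.foldl_cons, PySem.List.pyGetD_natCast, hget]
    rw [show ((k : Int) + 1) = (((k + 1 : Nat)) : Int) by push_cast; ring]
    rw [ih (k + 1) (pvFA init (k : Int) c) h1]
    simp [pvLoop]

lemma pvBridgeA (numbers : List (List (String × Int))) :
    property_1 numbers = pvFinish numbers (pvLoop numbers 0 (0, 0, 0, -1)) := by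
  have h := pvFoldEqLoop numbers numbers 0 (0, 0, 0, -1) rfl
  rw [Nat.cast_zero] at h
  show pvFinish numbers ((PySem.List.pyRange 0 ((numbers.length : Int)) 1).foldl
    (fun st i => pvFA st i (PySem.List.pyGetD numbers i [])) (0, 0, 0, -1)) = _
  rw [h]

lemma pvLoopRun :
    ∀ (run rest : List (List (String × Int))) (i mL len e M : Int),
      (∀ c ∈ run, pvModulus c = M) →
      pvLoop (run ++ rest) i (mL, len, e, M)
        = pvLoop rest (i + run.length) (mL, len + run.length, e, M) := by
  intro run
  induction run with
  | nil => intro rest i mL len e M _; simp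
  | cons c cs ih =>
    intro rest i mL len e M hM
    have hc : pvModulus c = M := hM c (List.mem_cons_self ..)
    simp only [List.cons_append, pvLoop, pvFA]
    rw [if_pos (by simp [hc])]
    rw [ih rest (i + 1) mL (len + 1) e M (fun x hx => hM x (List.mem_cons_of_mem _ hx))]
    have e1 : i + 1 + (cs.length : Int) = i + ((c :: cs).length : Int) := by
      push_cast [List.length_cons]; ring
    have e2 : len + 1 + (cs.length : Int) = len + ((c :: cs).length : Int) := by
      push_cast [List.length_cons]; ring
    rw [e1, e2]

lemma pvSliceSeg (pre pend rest : List (List (String × Int))) (a b : Int)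
    (ha : a = (pre.length : Int)) (hb : b = a + (pend.length : Int)) :
    PySem.List.slice (pre ++ (pend ++ rest)) (some a) (some b) = pend := by
  have h1 : a.toNat = pre.length := by omega
  rw [PySem.List.slice_toNat _ (by omega) (by omega), h1]
  rw [show b.toNat - pre.length = pend.length by omega]
  rw [List.drop_left, List.take_left]

lemma pvMainNil (pre pend best : List (List (String × Int))) (mL e M : Int)
    (hmL : mL = (best.length : Int))
    (hsl : PySem.List.slice (pre ++ (pend ++ [])) (some (e - mL)) (some e) = best) :
    pvFinish (pre ++ (pend ++ []))
      (mL, (pend.length : Int), e, M)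
    = ((((pend :: pvRuns []).foldl pvBestF best).length : Int),
        (pend :: pvRuns []).foldl pvBestF best) := by
  simp only [pvRuns, List.foldl_cons, List.foldl_nil, pvFinish, pvBestF]
  by_cases hgt : (pend.length : Int) > mL
  · rw [if_pos hgt, if_pos (by exact_mod_cast hmL ▸ hgt)]
    have hs := pvSliceSeg pre pend []
      (((pre ++ (pend ++ [])).length : Int) - (pend.length : Int))
      ((pre ++ (pend ++ [])).length : Int)
      (by simp only [List.append_nil, List.length_append]; push_cast; ring)
      (by simp only [List.append_nil, List.length_append]; push_cast; ring)
    rw [hs]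
  · rw [if_neg hgt, if_neg (by rw [hmL] at hgt; exact_mod_cast hgt), hsl, hmL]

lemma pvMain :
    ∀ (n : Nat) (rest : List (List (String × Int))), rest.length ≤ n →
    ∀ (pre pend best : List (List (String × Int))) (mL e M : Int),
      pend ≠ [] →
      (∀ c ∈ pend, pvModulus c = M) →
      (∀ c ∈ rest.head?, pvModulus c ≠ M) →
      mL = (best.length : Int) →
      PySem.List.slice (pre ++ (pend ++ rest)) (some (e - mL)) (some e) = best →
      pvFinish (pre ++ (pend ++ rest))
        (pvLoop rest ((pre.length : Int) + (pend.length : Int)) (mL, (pend.length : Int), e, M))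
      = ((((pend :: pvRuns rest).foldl pvBestF best).length : Int),
          (pend :: pvRuns rest).foldl pvBestF best) := by
  intro n
  induction n with
  | zero =>
    intro rest hr pre pend best mL e M _ _ _ hmL hsl
    have : rest = [] := List.eq_nil_of_length_eq_zero (by omega)
    subst this
    exact pvMainNil pre pend best mL e M hmL hsl
  | succ n ih =>
    intro rest hr pre pend best mL e M hne hM hb hmL hsl
    cases rest with
    | nil => exact pvMainNil pre pend best mL e M hmL hsl
    | cons c rest' =>
      have hbc : pvModulus c ≠ M := hb c rfl
      set tw := rest'.takeWhile (fun d => pvModulus d == pvModulus c) with htw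
      set dw := rest'.dropWhile (fun d => pvModulus d == pvModulus c) with hdw
      have hsplit : rest' = tw ++ dw := (List.takeWhile_append_dropWhile).symm
      have hfull : (pre ++ pend) ++ ((c :: tw) ++ dw) = pre ++ (pend ++ (c :: rest')) := by
        conv_rhs => rw [hsplit]
        simp [List.append_assoc]
      have hMtw : ∀ x ∈ c :: tw, pvModulus x = pvModulus c := by
        intro x hx
        rcases List.mem_cons.mp hx with h | h
        · rw [h]
        · simpa [beq_iff_eq] using List.mem_takeWhile_imp h
      have hbdw : ∀ x ∈ dw.head?, pvModulus x ≠ pvModulus c := by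
        intro x hx
        have h := List.head?_dropWhile_not (fun d => pvModulus d == pvModulus c) rest'
        rw [← hdw] at h
        cases hh : dw.head? with
        | none => rw [hh] at hx; cases hx
        | some y =>
          rw [hh] at hx h
          cases hx
          simpa [beq_iff_eq] using h
      have hlen : dw.length ≤ n := by
        have h1 : dw.length ≤ rest'.length := by
          rw [hdw]; exact List.length_dropWhile_le _ _
        simp at hr
        omega
      have hruns : pvRuns (c :: rest') = (c :: tw) :: pvRuns dw := by
        conv_lhs => rw [pvRuns]
      -- one loop step (the boundary element c), then the rest of the new run
      simp only [pvLoop, pvFA]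
      rw [if_neg (by simp [hbc])]
      by_cases hgt : (pend.length : Int) > mL
      · rw [if_pos hgt]
        conv_lhs => rw [← hfull, hsplit]
        rw [pvLoopRun tw dw ((pre.length : Int) + (pend.length : Int) + 1) (pend.length : Int) 1
          ((pre.length : Int) + (pend.length : Int)) (pvModulus c)
          (fun x hx => hMtw x (List.mem_cons_of_mem _ hx))]
        have key := ih dw hlen (pre ++ pend) (c :: tw) pend (pend.length : Int)
          ((pre.length : Int) + (pend.length : Int)) (pvModulus c)
          (List.cons_ne_nil _ _) hMtw hbdw (by rfl)
          (by
            rw [hfull]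
            exact pvSliceSeg pre pend (c :: rest') _ _ (by omega) (by omega))
        rw [show ((pre ++ pend).length : Int) + (((c :: tw).length : Nat) : Int)
              = (pre.length : Int) + (pend.length : Int) + 1 + (tw.length : Int) by
                push_cast [List.length_append, List.length_cons]; ring,
            show (((c :: tw).length : Nat) : Int) = 1 + (tw.length : Int) by
              push_cast [List.length_cons]; ring] at key
        rw [key, hruns]
        simp only [List.foldl_cons]
        rw [show pvBestF best pend = pend by
          unfold pvBestF; rw [if_pos (by rw [hmL] at hgt; exact_mod_cast hgt)]]
      · rw [if_neg hgt]
        conv_lhs => rw [← hfull, hsplit]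
        rw [pvLoopRun tw dw ((pre.length : Int) + (pend.length : Int) + 1) mL 1
          e (pvModulus c)
          (fun x hx => hMtw x (List.mem_cons_of_mem _ hx))]
        have key := ih dw hlen (pre ++ pend) (c :: tw) best mL e (pvModulus c)
          (List.cons_ne_nil _ _) hMtw hbdw hmL
          (by rw [hfull]; exact hsl)
        rw [show ((pre ++ pend).length : Int) + (((c :: tw).length : Nat) : Int)
              = (pre.length : Int) + (pend.length : Int) + 1 + (tw.length : Int) by
                push_cast [List.length_append, List.length_cons]; ring,
            show (((c :: tw).length : Nat) : Int) = 1 + (tw.length : Int) by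
              push_cast [List.length_cons]; ring] at key
        rw [key, hruns]
        simp only [List.foldl_cons]
        rw [show pvBestF best pend = best by
          unfold pvBestF
          rw [if_neg (by rw [hmL] at hgt; intro hcon; exact hgt (by exact_mod_cast hcon))]]

-- ===== VERDICT (by name: the statement is the Claim_ definition above) =====
theorem property_1_spec : Claim_equal_property_1 := by
  unfold Claim_equal_property_1
  intro numbers _ _
  unfold Spec_property_1
  rw [pvBridgeA]
  cases numbers with
  | nil => norm_num [pvFinish, pvLoop, property_1_alt, pvRuns, PySem.List.slice_toNat]
  | cons c rest =>
    have hmodc : pvModulus c ≠ -1 := by have := pvModulus_nonneg c; omega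
    set tw := rest.takeWhile (fun d => pvModulus d == pvModulus c) with htw
    set dw := rest.dropWhile (fun d => pvModulus d == pvModulus c) with hdw
    have hsplit : rest = tw ++ dw := (List.takeWhile_append_dropWhile).symm
    have hfull : ([] : List (List (String × Int))) ++ ((c :: tw) ++ dw) = c :: rest := by
      conv_rhs => rw [hsplit]
      simp
    have hMtw : ∀ x ∈ c :: tw, pvModulus x = pvModulus c := by
      intro x hx
      rcases List.mem_cons.mp hx with h | h
      · rw [h]
      · simpa [beq_iff_eq] using List.mem_takeWhile_imp h
    have hbdw : ∀ x ∈ dw.head?, pvModulus x ≠ pvModulus c := by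
      intro x hx
      have h := List.head?_dropWhile_not (fun d => pvModulus d == pvModulus c) rest
      rw [← hdw] at h
      cases hh : dw.head? with
      | none => rw [hh] at hx; cases hx
      | some y =>
        rw [hh] at hx h
        cases hx
        simpa [beq_iff_eq] using h
    have hruns : pvRuns (c :: rest) = (c :: tw) :: pvRuns dw := by
      conv_lhs => rw [pvRuns]
    simp only [pvLoop, pvFA]
    rw [if_neg (by simp [hmodc]), if_neg (by omega)]
    conv_lhs => rw [← hfull, hsplit]
    rw [pvLoopRun tw dw (0 + 1) 0 1 0 (pvModulus c)
      (fun x hx => hMtw x (List.mem_cons_of_mem _ hx))]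
    have key := pvMain dw.length dw le_rfl [] (c :: tw) [] 0 0 (pvModulus c)
      (List.cons_ne_nil _ _) hMtw hbdw (by simp)
      (by rw [PySem.List.slice_toNat _ (by omega) (by omega)]; simp)
    rw [show ((([] : List (List (String × Int))).length : Int) + (((c :: tw).length : Nat) : Int))
          = 0 + 1 + (tw.length : Int) by push_cast [List.length_cons, List.length_nil]; ring,
        show (((c :: tw).length : Nat) : Int) = 1 + (tw.length : Int) by
          push_cast [List.length_cons]; ring] at key
    rw [key]
    unfold property_1_alt
    rw [hruns]
    rfl
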